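-- pv_equiv track=rewrite | github.com/Enthalyon/python_practices | Laminas.py | puedocambiar
-- ===== SOURCE A (Python) =====
-- def puedocambiar(L1,L2):
--     salida1 = 0 # 1, 2, 3, 4
--     salida2 = 0 # 1, 2
--     for laminas in L1:
--         if laminas not in L2:
--             salida1 += 1
--
--     for laminas in L2:
--         if laminas not in L1:
--             salida2 += 1
--     return min(salida1, salida2)
-- ===== SOURCE B (Python) =====
-- def puedocambiar(L1, L2):
--     a = sorted(L1)
--     b = sorted(L2)
--     i = j = s1 = s2 = 0
--     while i < len(a) and j < len(b):
--         if a[i] < b[j]: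
--             s1 += 1
--             i += 1
--         elif b[j] < a[i]:
--             s2 += 1
--             j += 1
--         else:
--             v = a[i]
--             while i < len(a) and a[i] == v:
--                 i += 1
--             while j < len(b) and b[j] == v:
--                 j += 1
--     s1 += len(a) - i
--     s2 += len(b) - j
--     return min(s1, s2)
-- ===== Notes on version B (the rewrite author's own statement) =====
-- stated objective: faster
-- what changed: Sorts both lists and counts each side's elements missing from the other in a single two-pointer merge scan that skips equal-value runs, instead of A's per-element linear membership tests.
import Mathlib
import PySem

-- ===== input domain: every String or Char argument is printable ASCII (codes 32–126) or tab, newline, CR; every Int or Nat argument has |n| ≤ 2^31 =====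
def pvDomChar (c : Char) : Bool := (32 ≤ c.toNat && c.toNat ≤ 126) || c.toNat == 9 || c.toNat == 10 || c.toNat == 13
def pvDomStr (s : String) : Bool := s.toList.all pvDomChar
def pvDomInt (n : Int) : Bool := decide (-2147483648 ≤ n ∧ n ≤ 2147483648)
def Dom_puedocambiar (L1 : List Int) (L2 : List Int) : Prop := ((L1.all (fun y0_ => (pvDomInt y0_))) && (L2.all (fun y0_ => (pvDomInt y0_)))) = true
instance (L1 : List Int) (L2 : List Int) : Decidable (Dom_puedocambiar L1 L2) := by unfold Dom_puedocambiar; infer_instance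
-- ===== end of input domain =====

-- B sorts both lists and counts each side's unique elements in one two-pointer merge scan,
-- replacing A's two quadratic per-element membership passes (alternative algorithm; also faster).
-- ===== PORT A =====
-- Literal port of A: two per-element membership scans, then min.
def puedocambiar (L1 : List Int) (L2 : List Int) : Int :=
  let salida1 := L1.foldl (fun s laminas => if L2.contains laminas then s else s + 1) 0
  let salida2 := L2.foldl (fun s laminas => if L1.contains laminas then s else s + 1) 0
  min salida1 salida2

-- ===== PORT B =====
-- The merge loop of Source B: advance the smaller head counting it, skip equal runs on both
-- sides, and add the remaining lengths when one side is exhausted (the base cases).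
def mergeCount : List Int → List Int → Int × Int
  | [], ys => (0, (ys.length : Int))
  | x :: xs, [] => (((x :: xs).length : Int), 0)
  | x :: xs, y :: ys =>
    if x < y then
      let p := mergeCount xs (y :: ys); (p.1 + 1, p.2)
    else if y < x then
      let p := mergeCount (x :: xs) ys; (p.1, p.2 + 1)
    else
      mergeCount (xs.dropWhile (fun z => z == x)) (ys.dropWhile (fun z => z == x))
termination_by a b => a.length + b.length
decreasing_by
  · simp
  · simp
  · have h1 := List.length_dropWhile_le (fun z : Int => z == x) xs
    have h2 := List.length_dropWhile_le (fun z : Int => z == x) ys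
    simp only [List.length_cons]
    omega

def puedocambiar_alt (L1 : List Int) (L2 : List Int) : Int :=
  let a := PySem.List.sorted L1 (fun x => x) false
  let b := PySem.List.sorted L2 (fun x => x) false
  let p := mergeCount a b
  min p.1 p.2

-- ===== PRECONDITION & SPEC =====
def Spec_puedocambiar (L1 : List Int) (L2 : List Int) (out : Int) : Prop := out = puedocambiar_alt L1 L2
instance (L1 : List Int) (L2 : List Int) (out : Int) : Decidable (Spec_puedocambiar L1 L2 out) := by unfold Spec_puedocambiar; infer_instance

-- ===== CLAIM (what is proved, stated in full; the proofs are below) =====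
def Claim_equal_puedocambiar : Prop := ∀ (L1 : List Int) (L2 : List Int), Dom_puedocambiar L1 L2 → Spec_puedocambiar L1 L2 (puedocambiar L1 L2)

-- ===== LEMMAS AND PROOFS =====

-- A's loops count, per element, the elements missing from the other list.
lemma foldl_count (L2 : List Int) : ∀ (L : List Int) (s : Int),
    L.foldl (fun s laminas => if L2.contains laminas then s else s + 1) s
      = s + (L.countP (fun x => !L2.contains x) : Int) := by
  intro L
  induction L with
  | nil => intro s; simp
  | cons x xs ih =>
    intro s
    simp only [List.foldl_cons, ih, List.countP_cons]
    by_cases h : x ∈ L2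
    · simp [h]
    · simp [h]; omega

-- After dropping the leading run of x's from a sorted tail, every element is > x.
lemma dropWhile_gt (x : Int) (xs : List Int) (hx : xs.Pairwise (fun a b : Int => a ≤ b))
    (hall : ∀ z ∈ xs, x ≤ z) :
    ∀ z ∈ xs.dropWhile (fun a => a == x), x < z := by
  cases h : xs.dropWhile (fun a => a == x) with
  | nil => simp
  | cons e t =>
    have hsub : (e :: t).Sublist xs := h ▸ List.dropWhile_sublist _
    have hpe : (e :: t).Pairwise (fun a b : Int => a ≤ b) := hx.sublist hsub
    have hetmem : ∀ z ∈ e :: t, z ∈ xs := fun z hz => hsub.mem hz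
    have hne : e ≠ x := by
      have h0 := List.head?_dropWhile_not (p := fun a : Int => a == x) (l := xs)
      rw [h] at h0
      simpa using h0
    have hxe : x < e := lt_of_le_of_ne (hall e (hetmem e (by simp))) (Ne.symm hne)
    intro z hz
    rcases List.mem_cons.mp hz with rfl | hzt
    · exact hxe
    · exact lt_of_lt_of_le hxe ((List.pairwise_cons.mp hpe).1 z hzt)

-- Membership in a list is unchanged by dropping a leading run of x's, for values > x.
lemma contains_dropWhile (x z : Int) (l : List Int) (hz : x < z) :
    l.contains z = (l.dropWhile (fun a => a == x)).contains z := by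
  have htw : z ∉ l.takeWhile (fun a : Int => a == x) := by
    intro hmem
    have := List.mem_takeWhile_imp hmem
    simp at this; omega
  have hiff : z ∈ l ↔ z ∈ l.dropWhile (fun a => a == x) := by
    constructor
    · intro hm
      have hm2 : z ∈ l.takeWhile (fun a : Int => a == x) ++ l.dropWhile (fun a : Int => a == x) := by
        rw [List.takeWhile_append_dropWhile]; exact hm
      rcases List.mem_append.mp hm2 with h1 | h2
      · exact absurd h1 htw
      · exact h2
    · intro hm
      exact (List.dropWhile_sublist _).subset hm
  simp [List.contains_eq_mem, hiff]

-- The merge scan computes exactly the two "missing from the other list" counts.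
lemma mergeCount_spec : ∀ (xs ys : List Int),
    xs.Pairwise (fun a b : Int => a ≤ b) → ys.Pairwise (fun a b : Int => a ≤ b) →
    mergeCount xs ys
      = ((xs.countP (fun z => !ys.contains z) : Int), (ys.countP (fun z => !xs.contains z) : Int)) := by
  intro xs ys hx hy
  induction xs, ys using mergeCount.induct with
  | case1 ys =>
      simp [mergeCount, List.countP_eq_length.mpr (fun a _ => rfl)]
  | case2 x xs =>
      simp [mergeCount, List.countP_eq_length.mpr (fun a _ => rfl)]
  | case3 x xs y ys hlt ih =>
      have hxtail := List.pairwise_cons.mp hx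
      have hytail := List.pairwise_cons.mp hy
      have hxny : x ∉ y :: ys := by
        intro hm
        rcases List.mem_cons.mp hm with rfl | hm
        · omega
        · have := hytail.1 x hm; omega
      have hcont : ∀ z ∈ y :: ys, ((x :: xs).contains z = xs.contains z) := by
        intro z hz
        have hyz : y ≤ z := by
          rcases List.mem_cons.mp hz with rfl | hz
          · exact le_refl _
          · exact hytail.1 z hz
        have : z ≠ x := by omega
        simp [this]
      rw [mergeCount]
      simp only [if_pos hlt, ih hxtail.2 hy, Prod.mk.injEq]
      constructor
      · have hx2 : x ≠ y ∧ x ∉ ys := by simpa using hxny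
        simp [hx2.1, hx2.2]
      · congr 1
        exact List.countP_congr (fun z hz => by rw [hcont z hz])
  | case4 x xs y ys hlt hlt2 ih =>
      have hxtail := List.pairwise_cons.mp hx
      have hytail := List.pairwise_cons.mp hy
      have hynx : y ∉ x :: xs := by
        intro hm
        rcases List.mem_cons.mp hm with rfl | hm
        · omega
        · have := hxtail.1 y hm; omega
      have hcont : ∀ z ∈ x :: xs, ((y :: ys).contains z = ys.contains z) := by
        intro z hz
        have hxz : x ≤ z := by
          rcases List.mem_cons.mp hz with rfl | hz
          · exact le_refl _
          · exact hxtail.1 z hz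
        have : z ≠ y := by omega
        simp [this]
      rw [mergeCount]
      simp only [if_neg hlt, if_pos hlt2, ih hx hytail.2, Prod.mk.injEq]
      constructor
      · congr 1
        exact List.countP_congr (fun z hz => by rw [hcont z hz])
      · have hy2 : y ≠ x ∧ y ∉ xs := by simpa using hynx
        simp [hy2.1, hy2.2]
  | case5 x xs y ys hlt hlt2 ih =>
      have hxy : x = y := by omega
      subst hxy
      have hxtail := List.pairwise_cons.mp hx
      have hytail := List.pairwise_cons.mp hy
      have hxs' : (xs.dropWhile (fun z => z == x)).Pairwise (fun a b : Int => a ≤ b) :=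
        hxtail.2.sublist (List.dropWhile_sublist _)
      have hys' : (ys.dropWhile (fun z => z == x)).Pairwise (fun a b : Int => a ≤ b) :=
        hytail.2.sublist (List.dropWhile_sublist _)
      have hgtx : ∀ z ∈ xs.dropWhile (fun a => a == x), x < z :=
        dropWhile_gt x xs hxtail.2 hxtail.1
      have hgty : ∀ z ∈ ys.dropWhile (fun a => a == x), x < z :=
        dropWhile_gt x ys hytail.2 hytail.1
      rw [mergeCount]
      simp only [if_neg hlt, ih hxs' hys', Prod.mk.injEq]
      constructor
      · -- left components
        have h1 : (x :: xs).countP (fun z => !(x :: ys).contains z)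
            = (xs.dropWhile (fun a => a == x)).countP
                (fun z => !((ys.dropWhile (fun a => a == x)).contains z)) := by
          have hx' : x :: xs
              = (x :: xs).takeWhile (fun a : Int => a == x)
                  ++ xs.dropWhile (fun a : Int => a == x) := by
            conv_lhs => rw [← List.takeWhile_append_dropWhile
              (p := fun a : Int => a == x) (l := x :: xs)]
            simp
          rw [hx', List.countP_append]
          have htw0 : ((x :: xs).takeWhile (fun a : Int => a == x)).countP
              (fun z => !(x :: ys).contains z) = 0 := by
            apply List.countP_eq_zero.mpr
            intro z hz
            have := List.mem_takeWhile_imp hz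
            simp at this; subst this
            simp [List.contains_eq_mem]
          rw [htw0, Nat.zero_add]
          apply List.countP_congr
          intro z hz
          have hzgt := hgtx z hz
          have : (x :: ys).contains z = (ys.dropWhile (fun a => a == x)).contains z := by
            rw [contains_dropWhile x z (x :: ys) hzgt]
            simp
          rw [this]
        exact (congrArg Nat.cast h1).symm
      · -- right components
        have h1 : (x :: ys).countP (fun z => !(x :: xs).contains z)
            = (ys.dropWhile (fun a => a == x)).countP
                (fun z => !((xs.dropWhile (fun a => a == x)).contains z)) := by
          have hy' : x :: ys
              = (x :: ys).takeWhile (fun a : Int => a == x)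
                  ++ ys.dropWhile (fun a : Int => a == x) := by
            conv_lhs => rw [← List.takeWhile_append_dropWhile
              (p := fun a : Int => a == x) (l := x :: ys)]
            simp
          rw [hy', List.countP_append]
          have htw0 : ((x :: ys).takeWhile (fun a : Int => a == x)).countP
              (fun z => !(x :: xs).contains z) = 0 := by
            apply List.countP_eq_zero.mpr
            intro z hz
            have := List.mem_takeWhile_imp hz
            simp at this; subst this
            simp [List.contains_eq_mem]
          rw [htw0, Nat.zero_add]
          apply List.countP_congr
          intro z hz
          have hzgt := hgty z hz
          have : (x :: xs).contains z = (xs.dropWhile (fun a => a == x)).contains z := by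
            rw [contains_dropWhile x z (x :: xs) hzgt]
            simp
          rw [this]
        exact (congrArg Nat.cast h1).symm

-- ===== VERDICT (by name: the statement is the Claim_ definition above) =====
theorem puedocambiar_spec : Claim_equal_puedocambiar := by
  intro L1 L2 _
  simp only [Spec_puedocambiar, puedocambiar, puedocambiar_alt]
  have ha : (PySem.List.sorted L1 (fun x => x) false).Pairwise (fun a b : Int => a ≤ b) :=
    PySem.List.sorted_pairwise L1 (fun x => x)
  have hb : (PySem.List.sorted L2 (fun x => x) false).Pairwise (fun a b : Int => a ≤ b) :=
    PySem.List.sorted_pairwise L2 (fun x => x)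
  have hpa : (PySem.List.sorted L1 (fun x => x) false).Perm L1 :=
    PySem.List.sorted_perm L1 (fun x => x) false
  have hpb : (PySem.List.sorted L2 (fun x => x) false).Perm L2 :=
    PySem.List.sorted_perm L2 (fun x => x) false
  rw [foldl_count, foldl_count, mergeCount_spec _ _ ha hb]
  have hc1 : (fun z : Int => !(PySem.List.sorted L2 (fun x => x) false).contains z)
      = (fun z : Int => !L2.contains z) := by
    funext z
    simp [List.contains_eq_mem, hpb.mem_iff]
  have hc2 : (fun z : Int => !(PySem.List.sorted L1 (fun x => x) false).contains z)
      = (fun z : Int => !L1.contains z) := by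
    funext z
    simp [List.contains_eq_mem, hpa.mem_iff]
  rw [hc1, hc2, hpa.countP_eq, hpb.countP_eq]
  simp
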